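-- pv_equiv track=rewrite | github.com/starplatinum3/my_util_py_pub | strUtil/backup/strUtil.py | sentence_to_classname_or_methodname
-- ===== SOURCE A (Python) =====
-- def sentence_to_classname_or_methodname(sentence, which):
--     out_str = ""
--     len_sentence = len(sentence)
--
--     upper = True if which == "class" else False
--     for i in range(len_sentence):
--         if sentence[i] == " ":
--             upper = True
--             continue
--         else:
--             if upper:
--                 out_str += sentence[i].upper()
--                 upper = False
--             else:
--                 out_str += sentence[i]
--
--     return out_str
-- ===== SOURCE B (Python) =====
-- def sentence_to_classname_or_methodname(sentence, which):
--     prevs = (" " if which == "class" else "x") + sentence[:-1]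
--     return "".join(
--         c.upper() if p == " " else c
--         for p, c in zip(prevs, sentence)
--         if c != " "
--     )
-- ===== Notes on version B (the rewrite author's own statement) =====
-- stated objective: alternative
-- what changed: Replaces the stateful flag-carrying character loop by a stateless zip-with-predecessor comprehension: a character is uppercased iff its predecessor (seeded ' ' for the class case) is a space, and spaces are filtered out.
import Mathlib
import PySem

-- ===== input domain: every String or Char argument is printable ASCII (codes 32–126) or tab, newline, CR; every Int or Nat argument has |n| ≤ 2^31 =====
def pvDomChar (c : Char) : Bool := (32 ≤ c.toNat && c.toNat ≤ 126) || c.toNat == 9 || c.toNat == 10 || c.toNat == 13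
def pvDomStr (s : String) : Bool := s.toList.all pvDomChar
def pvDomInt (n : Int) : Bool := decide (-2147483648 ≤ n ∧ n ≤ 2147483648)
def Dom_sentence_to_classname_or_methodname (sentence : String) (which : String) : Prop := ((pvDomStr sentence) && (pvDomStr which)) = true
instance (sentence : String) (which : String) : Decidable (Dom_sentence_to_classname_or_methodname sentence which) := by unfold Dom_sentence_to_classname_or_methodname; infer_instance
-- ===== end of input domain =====

-- B replaces A's stateful flag loop by a stateless zip-with-predecessor comprehension (alternative decomposition, same result).

-- ===== PORT A =====
-- A: for i in range(len(sentence)): stateful loop over the characters carrying (out_str, upper).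
def sentence_to_classname_or_methodname (sentence : String) (which : String) : String :=
  let upper : Bool := which == "class"
  let r := sentence.toList.foldl (fun (st : List Char × Bool) c =>
      if c == ' ' then (st.1, true)
      else if st.2 then (st.1 ++ [PySem.Chars.upperChar c], false)
      else (st.1 ++ [c], false)) ([], upper)
  String.ofList r.1

-- ===== PORT B =====
-- B: prevs = seed + sentence[:-1]; join(c.upper() if p==' ' else c for p,c in zip(prevs,sentence) if c != ' ').
-- sentence[:-1] on a string is exactly List.dropLast of its characters.
def sentence_to_classname_or_methodname_alt (sentence : String) (which : String) : String :=
  let prevs : List Char := (if which == "class" then ' ' else 'x') :: sentence.toList.dropLast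
  String.ofList (((prevs.zip sentence.toList).filter (fun pc => !(pc.2 == ' '))).map
      (fun pc => if pc.1 == ' ' then PySem.Chars.upperChar pc.2 else pc.2))

-- ===== PRECONDITION & SPEC =====
def Spec_sentence_to_classname_or_methodname (sentence : String) (which : String) (out : String) : Prop := out = sentence_to_classname_or_methodname_alt sentence which
instance (sentence : String) (which : String) (out : String) : Decidable (Spec_sentence_to_classname_or_methodname sentence which out) := by unfold Spec_sentence_to_classname_or_methodname; infer_instance

-- ===== CLAIM (what is proved, stated in full; the proofs are below) =====
def Claim_equal_sentence_to_classname_or_methodname : Prop := ∀ (sentence : String) (which : String), Dom_sentence_to_classname_or_methodname sentence which → Spec_sentence_to_classname_or_methodname sentence which (sentence_to_classname_or_methodname sentence which)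

-- ===== LEMMAS AND PROOFS =====

-- One step of A's loop.
def pvStepA (st : List Char × Bool) (c : Char) : List Char × Bool :=
  if c == ' ' then (st.1, true)
  else if st.2 then (st.1 ++ [PySem.Chars.upperChar c], false)
  else (st.1 ++ [c], false)

-- B's body as a function of the seed predecessor.
def pvB (p : Char) (cs : List Char) : List Char :=
  (((p :: cs.dropLast).zip cs).filter (fun pc => !(pc.2 == ' '))).map
      (fun pc => if pc.1 == ' ' then PySem.Chars.upperChar pc.2 else pc.2)

lemma pvB_nil (p : Char) : pvB p [] = [] := rfl

lemma pvB_cons (p c : Char) (rest : List Char) :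
    pvB p (c :: rest) =
      (if c == ' ' then [] else [if p == ' ' then PySem.Chars.upperChar c else c]) ++ pvB c rest := by
  have hzip : ((p :: (c :: rest).dropLast).zip (c :: rest))
      = (p, c) :: ((c :: rest.dropLast).zip rest) := by
    cases rest with
    | nil => rfl
    | cons d ds => rfl
  unfold pvB
  rw [hzip]
  by_cases hc : c = ' '
  · simp [hc, List.filter]
  · have hcf : (c == ' ') = false := by simp [hc]
    simp [hcf, List.filter]

lemma pvMain (cs : List Char) : ∀ (p : Char) (acc : List Char),
    (cs.foldl pvStepA (acc, p == ' ')).1 = acc ++ pvB p cs := by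
  induction cs with
  | nil => intro p acc; simp [pvB_nil]
  | cons c rest ih =>
    intro p acc
    rw [pvB_cons]
    by_cases hc : c = ' '
    · subst hc
      have h1 : pvStepA (acc, p == ' ') ' ' = (acc, (' ' == ' ')) := by
        simp [pvStepA]
      simp only [List.foldl_cons, h1, ih ' ' acc]
      simp
    · by_cases hp : p = ' '
      · have h1 : pvStepA (acc, p == ' ') c = (acc ++ [PySem.Chars.upperChar c], (c == ' ')) := by
          simp [pvStepA, hc, hp]
        simp only [List.foldl_cons, h1, ih c (acc ++ [PySem.Chars.upperChar c])]
        simp [hc, hp]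
      · have h1 : pvStepA (acc, p == ' ') c = (acc ++ [c], (c == ' ')) := by
          simp [pvStepA, hc, hp]
        simp only [List.foldl_cons, h1, ih c (acc ++ [c])]
        simp [hc, hp]

-- ===== VERDICT (by name: the statement is the Claim_ definition above) =====
theorem sentence_to_classname_or_methodname_spec : Claim_equal_sentence_to_classname_or_methodname := by
  intro sentence which _
  unfold Spec_sentence_to_classname_or_methodname sentence_to_classname_or_methodname
    sentence_to_classname_or_methodname_alt
  show String.ofList (sentence.toList.foldl pvStepA ([], which == "class")).1
      = String.ofList (pvB (if which == "class" then ' ' else 'x') sentence.toList)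
  by_cases h : which == "class"
  · have hmain := pvMain sentence.toList ' ' []
    simp only [List.nil_append] at hmain
    simp only [h, if_pos]
    rw [show (true : Bool) = (' ' == ' ') from rfl, hmain]
  · have hmain := pvMain sentence.toList 'x' []
    simp only [List.nil_append] at hmain
    simp only [h, Bool.false_eq_true, ite_false]
    rw [show (false : Bool) = ('x' == ' ') from rfl, hmain]
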